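-- pv_equiv track=rewrite | github.com/my-lambda-projects/Lambda | WEEKS/wk18/code_signal/cs-week1-projects.py | countVowelConsonant
-- ===== SOURCE A (Python) =====
-- def countVowelConsonant(s):
--     vowel_count = 0
--     const_count = 0
--     vowels = ["a", "e", "i", "o", "u"]
--     for letter in s:
--         if letter in vowels:
--             vowel_count += 1
--         else:
--             const_count += 2
--     return vowel_count + const_count
-- ===== SOURCE B (Python) =====
-- def countVowelConsonant(s):
--     # count each vowel with str.count (one scan per vowel, no per-character branch),
--     # then every char contributes 2 except vowels which contribute 1 less.
--     vowel_total = sum(s.count(v) for v in "aeiou")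
--     return 2 * len(s) - vowel_total
-- ===== Notes on version B (the rewrite author's own statement) =====
-- stated objective: faster
-- what changed: B never tests characters for vowel membership: it iterates over the five vowels, counting each with str.count (five substring scans done in C), and returns 2*len(s) minus that total; A's per-character Python loop with two accumulators disappears.
import Mathlib
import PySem

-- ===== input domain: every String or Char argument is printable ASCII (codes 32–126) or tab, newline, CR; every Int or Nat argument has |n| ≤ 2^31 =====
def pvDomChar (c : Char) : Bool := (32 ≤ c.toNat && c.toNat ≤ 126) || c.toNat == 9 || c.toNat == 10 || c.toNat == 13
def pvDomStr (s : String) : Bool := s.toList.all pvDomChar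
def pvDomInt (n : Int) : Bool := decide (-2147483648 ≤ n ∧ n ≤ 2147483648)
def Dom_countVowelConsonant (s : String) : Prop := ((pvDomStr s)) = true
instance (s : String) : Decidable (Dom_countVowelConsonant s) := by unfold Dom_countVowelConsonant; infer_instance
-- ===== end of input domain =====

-- B replaces A's per-character membership loop by five str.count scans (one per vowel)
-- and the closed form 2*len(s) - vowel_total (alternative decomposition, same asymptotic cost).

-- ===== PORT A =====
-- A: two counters; for each letter: vowel → vowel_count += 1, else const_count += 2; returns their sum
def countVowelConsonant (s : String) : Int :=
  let vowels : List String := ["a", "e", "i", "o", "u"]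
  let r := s.toList.foldl (fun (st : Int × Int) letter =>
    if (String.ofList [letter]) ∈ vowels then (st.1 + 1, st.2) else (st.1, st.2 + 2)) (0, 0)
  r.1 + r.2

-- ===== PORT B =====
-- B: vowel_total = sum(s.count(v) for v in "aeiou"); return 2*len(s) - vowel_total
def countVowelConsonant_alt (s : String) : Int :=
  let vowelTotal : Int := ("aeiou".toList.map
    (fun v => (PySem.Str.count s (String.ofList [v]) : Int))).sum
  2 * (s.toList.length : Int) - vowelTotal

-- ===== PRECONDITION & SPEC =====
def Spec_countVowelConsonant (s : String) (out : Int) : Prop := out = countVowelConsonant_alt s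
instance (s : String) (out : Int) : Decidable (Spec_countVowelConsonant s out) := by unfold Spec_countVowelConsonant; infer_instance

-- ===== CLAIM (what is proved, stated in full; the proofs are below) =====
def Claim_equal_countVowelConsonant : Prop := ∀ (s : String), Dom_countVowelConsonant s → Spec_countVowelConsonant s (countVowelConsonant s)

-- ===== LEMMAS AND PROOFS =====

-- membership in A's list of one-letter strings ↔ the char is a vowel
lemma cvc_mem_iff (c : Char) :
    ((String.ofList [c]) ∈ (["a", "e", "i", "o", "u"] : List String)) ↔
      c ∈ (['a', 'e', 'i', 'o', 'u'] : List Char) := by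
  constructor
  · intro h
    simp only [List.mem_cons, List.not_mem_nil, or_false] at h
    rcases h with h | h | h | h | h <;>
      · have := congrArg String.toList h
        simp at this
        simp [this]
  · intro h
    simp only [List.mem_cons, List.not_mem_nil, or_false] at h
    rcases h with rfl | rfl | rfl | rfl | rfl <;> simp

-- Python's s.count for a single-character needle is the character count
lemma cvc_count_go_single (c : Char) (l : List Char) (fuel acc : Nat)
    (h : l.length ≤ fuel) :
    PySem.Chars.count.go [c] fuel l acc = acc + l.count c := by
  induction l generalizing fuel acc with
  | nil => cases fuel <;> simp [PySem.Chars.count.go]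
  | cons x t ih =>
    cases fuel with
    | zero => simp at h
    | succ n =>
      by_cases hx : x = c
      · subst hx
        have : ([x] : List Char).isPrefixOf (x :: t) = true := by
          simp [List.isPrefixOf]
        simp only [PySem.Chars.count.go, this, if_true, List.length_cons, List.length_nil,
          List.drop_succ_cons, List.drop_zero]
        rw [ih n (acc + 1) (by simpa using Nat.le_of_succ_le_succ h)]
        simp [List.count_cons]
        omega
      · have : ([c] : List Char).isPrefixOf (x :: t) = false := by
          simp [List.isPrefixOf, hx]
          exact fun hh => (hx hh.symm).elim
        simp only [PySem.Chars.count.go, this, if_false]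
        rw [ih n acc (by simpa using Nat.le_of_succ_le_succ h)]
        simp [List.count_cons, hx]

lemma cvc_count_single (c : Char) (l : List Char) :
    PySem.Chars.count l [c] = l.count c := by
  have h := cvc_count_go_single c l l.length 0 le_rfl
  simpa [PySem.Chars.count] using h

-- sum of the five per-vowel counts = number of vowel characters
lemma cvc_five (l : List Char) :
    ((l.count 'a' : Int) + (l.count 'e' : Int) + (l.count 'i' : Int)
      + (l.count 'o' : Int) + (l.count 'u' : Int))
      = (l.countP (fun c => decide (c ∈ (['a','e','i','o','u'] : List Char))) : Int) := by
  induction l with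
  | nil => simp
  | cons c t ih =>
    simp only [List.count_cons, List.countP_cons, decide_eq_true_eq]
    simp only [List.mem_cons, List.not_mem_nil, or_false] at ih ⊢
    by_cases h : c = 'a' ∨ c = 'e' ∨ c = 'i' ∨ c = 'o' ∨ c = 'u'
    · rcases h with rfl | rfl | rfl | rfl | rfl <;>
        · simp only [beq_iff_eq, reduceIte, true_or, or_true, if_true]
          push_cast
          omega
    · push_neg at h
      obtain ⟨ha, he, hi, ho, hu⟩ := h
      simp only [beq_iff_eq, ha, he, hi, ho, hu, false_or, or_self, if_false, ite_false]
      push_cast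
      omega

-- A's two-counter fold, characterised by the vowel count and the length
lemma cvc_loop (l : List Char) (a b : Int) :
    (l.foldl (fun (st : Int × Int) letter =>
      if (String.ofList [letter]) ∈ (["a", "e", "i", "o", "u"] : List String) then (st.1 + 1, st.2)
      else (st.1, st.2 + 2)) (a, b)) =
    (a + (l.countP (fun c => decide (c ∈ (['a','e','i','o','u'] : List Char))) : Int),
     b + 2 * (l.length : Int)
       - 2 * (l.countP (fun c => decide (c ∈ (['a','e','i','o','u'] : List Char))) : Int)) := by
  induction l generalizing a b with
  | nil => simp
  | cons c t ih =>
    simp only [List.foldl_cons]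
    by_cases h : c ∈ (['a','e','i','o','u'] : List Char)
    · rw [if_pos ((cvc_mem_iff c).mpr h), ih]
      simp only [Prod.mk.injEq, List.length_cons, List.countP_cons, decide_eq_true_eq]
      simp only [h, if_true]
      push_cast
      constructor <;> ring
    · rw [if_neg (fun hh => h ((cvc_mem_iff c).mp hh)), ih]
      simp only [Prod.mk.injEq, List.length_cons, List.countP_cons, decide_eq_true_eq]
      simp only [h, if_false]
      push_cast
      constructor <;> ring

-- ===== VERDICT (by name: the statement is the Claim_ definition above) =====
theorem countVowelConsonant_spec : Claim_equal_countVowelConsonant := by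
  intro s _
  unfold Spec_countVowelConsonant countVowelConsonant countVowelConsonant_alt
  have hs : "aeiou".toList = ['a', 'e', 'i', 'o', 'u'] := rfl
  simp only [cvc_loop, PySem.Str.count_eq, hs, List.map_cons, List.map_nil, List.sum_cons,
    List.sum_nil, String.toList_ofList]
  have h5 := cvc_five s.toList
  simp only [cvc_count_single] at *
  omega
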